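-- pv_equiv track=rewrite | github.com/ogamircs/job-finder | src/job_finder/app.py | _posted_at_rank
-- ===== SOURCE A (Python) =====
-- def _posted_at_rank(posted_at: str) -> int:
--     cleaned = str(posted_at or "").strip().casefold()
--     if not cleaned:
--         return 10_000
--     if cleaned in {"today", "just posted", "new"}:
--         return 0
--     if "hour" in cleaned:
--         digits = "".join(character for character in cleaned if character.isdigit())
--         return int(digits or "1")
--     if "day" in cleaned:
--         digits = "".join(character for character in cleaned if character.isdigit())
--         return 24 + int(digits or "1")
--     if "week" in cleaned:
--         digits = "".join(character for character in cleaned if character.isdigit())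
--         return 24 * 7 + int(digits or "1")
--     if "month" in cleaned:
--         digits = "".join(character for character in cleaned if character.isdigit())
--         return 24 * 30 + int(digits or "1")
--     return 5_000
-- ===== SOURCE B (Python) =====
-- def _posted_at_rank(posted_at: str) -> int:
--     cleaned = str(posted_at or "").strip().casefold()
--     if not cleaned:
--         return 10_000
--     if cleaned in {"today", "just posted", "new"}:
--         return 0
--     # One fused left-to-right scan: collect digit characters and find the
--     # best (lowest-index) keyword of the priority table by checking, at each
--     # position, whether a keyword starts there.  No substring membership
--     # tests, no per-branch digit extraction.
--     best = 4
--     digits = []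
--     for i in range(len(cleaned)):
--         c = cleaned[i]
--         if c.isdigit():
--             digits.append(c)
--         for p, kw in enumerate(("hour", "day", "week", "month")):
--             if p < best and cleaned.startswith(kw, i):
--                 best = p
--     if best == 4:
--         return 5_000
--     return (0, 24, 168, 720)[best] + int("".join(digits) or "1")
-- ===== Notes on version B (the rewrite author's own statement) =====
-- stated objective: alternative
-- what changed: B replaces the chain of four substring-membership tests (each with its own digit extraction) by one fused left-to-right scan that simultaneously collects digit characters and finds the highest-priority keyword by manual startswith checks at every position.
import Mathlib
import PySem

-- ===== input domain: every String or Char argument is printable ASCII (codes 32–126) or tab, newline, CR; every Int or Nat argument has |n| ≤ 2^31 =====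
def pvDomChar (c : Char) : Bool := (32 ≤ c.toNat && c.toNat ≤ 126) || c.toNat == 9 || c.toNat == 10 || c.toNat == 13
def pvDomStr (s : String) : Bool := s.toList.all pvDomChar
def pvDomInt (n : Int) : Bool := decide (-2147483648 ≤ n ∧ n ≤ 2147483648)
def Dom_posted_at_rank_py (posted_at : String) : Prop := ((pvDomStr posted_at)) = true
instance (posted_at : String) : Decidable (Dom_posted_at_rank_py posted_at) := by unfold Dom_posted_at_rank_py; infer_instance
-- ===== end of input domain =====

-- B fuses everything into one left-to-right scan (manual startswith keyword matching with a
-- priority accumulator plus digit collection), replacing A's chain of substring-membership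
-- branches; objective: alternative (same cost, different algorithm).

set_option maxHeartbeats 1000000


-- int(ds or "1") where ds holds only digit characters: int() never raises there,
-- so the .getD 0 default is unreachable.  Both Pythons call int() this way.
def pvIntOfDigits (digits : List Char) : Int :=
  (PySem.Int.ofChars? (if digits = [] then ['1'] else digits)).getD 0

-- ===== PORT A =====
-- 'str(posted_at or "")' is posted_at itself (a str; falsy only when ""); .casefold() = Chars.lower,
-- exact on the ASCII domain.
def posted_at_rank_py (posted_at : String) : Int :=
  let cleaned := PySem.Chars.lower (PySem.Chars.strip posted_at.toList)
  if cleaned = [] then 10000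
  else if cleaned = "today".toList ∨ cleaned = "just posted".toList ∨ cleaned = "new".toList then 0
  else if PySem.Chars.isIn "hour".toList cleaned then
    pvIntOfDigits (cleaned.filter PySem.Chars.isdigit)
  else if PySem.Chars.isIn "day".toList cleaned then
    24 + pvIntOfDigits (cleaned.filter PySem.Chars.isdigit)
  else if PySem.Chars.isIn "week".toList cleaned then
    24 * 7 + pvIntOfDigits (cleaned.filter PySem.Chars.isdigit)
  else if PySem.Chars.isIn "month".toList cleaned then
    24 * 30 + pvIntOfDigits (cleaned.filter PySem.Chars.isdigit)
  else 5000

-- ===== PORT B =====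
-- inner 'for p, kw in enumerate(...)': fold over the enumerated table;
-- 'cleaned.startswith(kw, i)' is Chars.startswith applied to the suffix of cleaned at i
def pvBestStep (s : List Char) (best : Nat) : Nat :=
  [(0, "hour".toList), (1, "day".toList), (2, "week".toList), (3, "month".toList)].foldl
    (fun b pkw => if pkw.1 < b ∧ PySem.Chars.startswith s pkw.2 then pkw.1 else b) best

-- the outer 'for i in range(len(cleaned))': structural recursion on the suffix at i,
-- carrying (best, digits); 'digits.append(c)' is digits ++ [c]
def pvScan : List Char → Nat → List Char → Nat × List Char
  | [], best, digits => (best, digits)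
  | c :: rest, best, digits =>
      pvScan rest (pvBestStep (c :: rest) best)
        (if PySem.Chars.isdigit c then digits ++ [c] else digits)

def posted_at_rank_py_alt (posted_at : String) : Int :=
  let cleaned := PySem.Chars.lower (PySem.Chars.strip posted_at.toList)
  if cleaned = [] then 10000
  else if cleaned = "today".toList ∨ cleaned = "just posted".toList ∨ cleaned = "new".toList then 0
  else
    let scanned := pvScan cleaned 4 []
    if scanned.1 = 4 then 5000
    else [(0 : Int), 24, 168, 720].getD scanned.1 0 + pvIntOfDigits scanned.2

-- ===== PRECONDITION & SPEC =====
def Spec_posted_at_rank_py (posted_at : String) (out : Int) : Prop := out = posted_at_rank_py_alt posted_at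
instance (posted_at : String) (out : Int) : Decidable (Spec_posted_at_rank_py posted_at out) := by unfold Spec_posted_at_rank_py; infer_instance

-- ===== CLAIM (what is proved, stated in full; the proofs are below) =====
def Claim_equal_posted_at_rank_py : Prop := ∀ (posted_at : String), Dom_posted_at_rank_py posted_at → Spec_posted_at_rank_py posted_at (posted_at_rank_py posted_at)

-- ===== LEMMAS AND PROOFS =====

-- priority of the first keyword (in table order) occurring anywhere in s
def pvPrio (s : List Char) : Nat :=
  if PySem.Chars.isIn "hour".toList s then 0
  else if PySem.Chars.isIn "day".toList s then 1
  else if PySem.Chars.isIn "week".toList s then 2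
  else if PySem.Chars.isIn "month".toList s then 3
  else 4

-- priority of the first keyword that starts at position 0 of s
def pvPPrio (s : List Char) : Nat :=
  if PySem.Chars.startswith s "hour".toList then 0
  else if PySem.Chars.startswith s "day".toList then 1
  else if PySem.Chars.startswith s "week".toList then 2
  else if PySem.Chars.startswith s "month".toList then 3
  else 4

theorem isIn_cons (kw : List Char) (c : Char) (s : List Char) :
    PySem.Chars.isIn kw (c :: s) = (PySem.Chars.startswith (c :: s) kw || PySem.Chars.isIn kw s) := by
  rw [Bool.eq_iff_iff]
  simp [PySem.Chars.isIn_iff_infix, List.infix_cons_iff, PySem.Chars.startswith,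
    List.isPrefixOf_iff_prefix]

-- an if-chain with increasing values 0 < 1 < 2 < 3 < 4 is the min of its individual tests
theorem chainMin (q1 q2 q3 q4 : Bool) :
    (if q1 then 0 else if q2 then 1 else if q3 then 2 else if q4 then 3 else (4 : Nat))
      = min (if q1 then 0 else 4)
          (min (if q2 then 1 else 4) (min (if q3 then 2 else 4) (if q4 then 3 else 4))) := by
  cases q1 <;> cases q2 <;> cases q3 <;> cases q4 <;> decide

theorem orMin (a b : Bool) (v : Nat) (hv : v ≤ 4) :
    (if (a || b) then v else 4) = min (if a then v else 4) (if b then v else 4) := by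
  cases a <;> cases b <;> simp <;> omega

theorem minShuffle (A1 A2 A3 A4 B1 B2 B3 B4 : Nat) :
    min (min A1 B1) (min (min A2 B2) (min (min A3 B3) (min A4 B4)))
      = min (min A1 (min A2 (min A3 A4))) (min B1 (min B2 (min B3 B4))) := by
  simp only [min_assoc]
  rw [min_left_comm B1 A2, min_left_comm B2 A3, min_left_comm B1 A3,
    min_left_comm B3 A4, min_left_comm B2 A4, min_left_comm B1 A4]

theorem pvPrio_cons (c : Char) (s : List Char) :
    pvPrio (c :: s) = min (pvPPrio (c :: s)) (pvPrio s) := by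
  simp only [pvPrio, pvPPrio, isIn_cons]
  rw [chainMin, chainMin, chainMin,
    orMin _ _ 0 (by omega), orMin _ _ 1 (by omega), orMin _ _ 2 (by omega), orMin _ _ 3 (by omega)]
  exact minShuffle _ _ _ _ _ _ _ _

theorem pvBestStep_eq (s : List Char) (best : Nat) (hb : best ≤ 4) :
    pvBestStep s best = min best (pvPPrio s) := by
  simp only [pvBestStep, pvPPrio, List.foldl]
  cases h1 : PySem.Chars.startswith s "hour".toList <;>
  cases h2 : PySem.Chars.startswith s "day".toList <;>
  cases h3 : PySem.Chars.startswith s "week".toList <;>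
  cases h4 : PySem.Chars.startswith s "month".toList <;>
    simp only [Bool.false_eq_true, and_true, and_false,
      if_false, if_true] <;> (try split_ifs) <;> omega

theorem pvPrio_nil : pvPrio [] = 4 := by decide

theorem pvPrio_le (s : List Char) : pvPrio s ≤ 4 := by
  unfold pvPrio; split_ifs <;> omega

theorem pvScan_fst (s : List Char) : ∀ (best : Nat) (digits : List Char), best ≤ 4 →
    (pvScan s best digits).1 = min best (pvPrio s) := by
  induction s with
  | nil =>
      intro best digits hb
      simp [pvScan, pvPrio_nil]
      omega
  | cons c rest ih =>
      intro best digits hb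
      rw [pvScan, ih _ _ (by rw [pvBestStep_eq _ _ hb]; omega), pvBestStep_eq _ _ hb, pvPrio_cons]
      omega

theorem pvScan_snd (s : List Char) : ∀ (best : Nat) (digits : List Char),
    (pvScan s best digits).2 = digits ++ s.filter PySem.Chars.isdigit := by
  induction s with
  | nil => intro best digits; simp [pvScan]
  | cons c rest ih =>
      intro best digits
      by_cases h : PySem.Chars.isdigit c = true <;>
        simp [pvScan, ih, h]

-- ===== VERDICT (by name: the statement is the Claim_ definition above) =====
theorem posted_at_rank_py_spec : Claim_equal_posted_at_rank_py := by
  intro s _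
  unfold Spec_posted_at_rank_py posted_at_rank_py posted_at_rank_py_alt
  set cleaned := PySem.Chars.lower (PySem.Chars.strip s.toList) with hc
  have hf : (pvScan cleaned 4 []).1 = pvPrio cleaned := by
    rw [pvScan_fst _ _ _ (by omega)]
    have := pvPrio_le cleaned
    omega
  have hs : (pvScan cleaned 4 []).2 = cleaned.filter PySem.Chars.isdigit := by
    rw [pvScan_snd]; simp
  simp only [hf, hs]
  by_cases h0 : cleaned = []
  · simp [h0]
  · simp only [if_neg h0]
    by_cases h1 : cleaned = "today".toList ∨ cleaned = "just posted".toList ∨ cleaned = "new".toList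
    · rw [if_pos h1, if_pos h1]
    · simp only [if_neg h1]
      unfold pvPrio
      split_ifs <;> (try contradiction) <;> norm_num [List.getD]
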